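-- pv_equiv track=rewrite | github.com/mingeun128/algorithm | Programmers/Lv.0/숫자 찾기.py | solution
-- ===== SOURCE A (Python) =====
-- def solution(num, k):
--     answer = -1
--     i = 0
--     while num > 0:
--         if num % 10 == k:
--             answer = i
--         num //= 10
--         i+=1
--     if answer == -1:
--         return answer
--     else:
--         return i - answer
-- ===== SOURCE B (Python) =====
-- def solution(num, k):
--     if num <= 0 or k < 0 or k > 9:
--         return -1
--     pos = str(num).find(str(k))
--     return -1 if pos == -1 else pos + 1
-- ===== Notes on version B (the rewrite author's own statement) =====
-- stated objective: idiomatic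
-- what changed: Replaces the right-to-left arithmetic digit loop (tracking the last matching counter and the digit count) by a single left-to-right string search: str(num).find(str(k)) + 1, with a direct -1 guard for non-positive num and non-digit k.
import Mathlib
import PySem

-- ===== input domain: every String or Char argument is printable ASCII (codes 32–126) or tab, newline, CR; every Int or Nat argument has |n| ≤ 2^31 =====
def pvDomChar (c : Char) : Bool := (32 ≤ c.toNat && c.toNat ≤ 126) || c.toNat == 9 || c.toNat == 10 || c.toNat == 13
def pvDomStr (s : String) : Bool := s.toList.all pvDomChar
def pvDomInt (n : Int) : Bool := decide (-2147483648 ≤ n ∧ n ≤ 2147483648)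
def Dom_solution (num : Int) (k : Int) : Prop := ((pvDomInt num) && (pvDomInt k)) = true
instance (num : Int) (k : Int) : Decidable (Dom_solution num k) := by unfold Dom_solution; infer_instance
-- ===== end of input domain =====

-- B replaces A's right-to-left arithmetic digit loop by a single left-to-right
-- string search (str(num).find(str(k)) + 1); same return value, idiomatic form.
-- ===== PORT A =====
def solGo (k num answer i : Int) : Int × Int :=
  if h : 0 < num then
    solGo k (PySem.Int.floordiv num 10)
      (if PySem.Int.mod num 10 = k then i else answer) (i + 1)
  else (answer, i)
termination_by num.toNat
decreasing_by
  have hb : PySem.Int.floordiv num 10 = num / 10 := by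
    simp [PySem.Int.floordiv, Int.fdiv_eq_ediv]
  rw [hb]
  omega

def solution (num : Int) (k : Int) : Int :=
  if (solGo k num (-1) 0).1 = -1 then (solGo k num (-1) 0).1
  else (solGo k num (-1) 0).2 - (solGo k num (-1) 0).1

-- ===== PORT B =====
def solution_alt (num : Int) (k : Int) : Int :=
  if num ≤ 0 ∨ k < 0 ∨ 9 < k then -1
  else
    let pos := PySem.Str.find (PySem.Int.toStr num) (PySem.Int.toStr k)
    if pos = -1 then -1 else pos + 1

-- ===== PRECONDITION & SPEC =====
def Spec_solution (num : Int) (k : Int) (out : Int) : Prop := out = solution_alt num k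
instance (num : Int) (k : Int) (out : Int) : Decidable (Spec_solution num k out) := by unfold Spec_solution; infer_instance

-- ===== CLAIM (what is proved, stated in full; the proofs are below) =====
def Claim_equal_solution : Prop := ∀ (num : Int) (k : Int), Dom_solution num k → Spec_solution num k (solution num k)

-- ===== LEMMAS AND PROOFS =====

-- big-endian decimal digit characters of n (empty for n = 0)
def chars (n : Nat) : List Char := (Nat.digits 10 n).reverse.map Nat.digitChar

theorem chars_zero : chars 0 = [] := by simp [chars]

theorem chars_pos (n : Nat) (h : 0 < n) :
    chars n = chars (n / 10) ++ [Nat.digitChar (n % 10)] := by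
  unfold chars
  rw [Nat.digits_def' (by norm_num) h]
  simp

theorem chars_len_pos (n : Nat) (h : 0 < n) : 0 < (chars n).length := by
  rw [chars_pos n h]; simp

theorem toDigitsCore_succ (f n : Nat) (ds : List Char) :
    Nat.toDigitsCore 10 (f + 1) n ds =
      if n / 10 = 0 then (n % 10).digitChar :: ds
      else Nat.toDigitsCore 10 f (n / 10) ((n % 10).digitChar :: ds) := by
  rfl

theorem toDigitsCore_eq_chars (fuel : Nat) :
    ∀ n ds, 0 < n → n < fuel → Nat.toDigitsCore 10 fuel n ds = chars n ++ ds := by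
  induction fuel with
  | zero => intro n ds h hf; omega
  | succ f ih =>
    intro n ds h hf
    rw [toDigitsCore_succ]
    by_cases h0 : n / 10 = 0
    · rw [if_pos h0, chars_pos n h, h0, chars_zero]
      simp
    · rw [if_neg h0, ih (n / 10) _ (Nat.pos_of_ne_zero h0) (by omega)]
      rw [chars_pos n h]
      simp

theorem toDigits_eq_chars (n : Nat) (h : 0 < n) : Nat.toDigits 10 n = chars n := by
  rw [Nat.toDigits, toDigitsCore_eq_chars (n + 1) n [] h (by omega), List.append_nil]

theorem toChars_pos (num : Int) (h : 0 < num) :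
    PySem.Int.toChars num = chars num.toNat := by
  rw [PySem.Int.toChars, if_neg (by omega), toDigits_eq_chars _ (by omega)]

theorem toChars_digit (k : Int) (h0 : 0 ≤ k) (h9 : k ≤ 9) :
    PySem.Int.toChars k = [Nat.digitChar k.toNat] := by
  rw [PySem.Int.toChars, if_neg (by omega)]
  have : k.toNat ≤ 9 := by omega
  interval_cases h : k.toNat <;> decide

theorem digitChar_inj (a b : Nat) (ha : a < 10) (hb : b < 10)
    (h : Nat.digitChar a = Nat.digitChar b) : a = b := by
  interval_cases a <;> interval_cases b <;> simp_all <;> revert h <;> decide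

-- first index of c in s, -1 if absent
def myIdx : List Char → Char → Int
  | [], _ => -1
  | x :: t, c => if x = c then 0 else (if myIdx t c = -1 then -1 else myIdx t c + 1)

theorem myIdx_ge (s : List Char) (c : Char) : -1 ≤ myIdx s c := by
  induction s with
  | nil => simp [myIdx]
  | cons x t ih => rw [myIdx]; split_ifs <;> omega

theorem myIdx_not_mem (s : List Char) (c : Char) (h : c ∉ s) : myIdx s c = -1 := by
  induction s with
  | nil => rfl
  | cons x t ih =>
    simp only [List.mem_cons, not_or] at h
    rw [myIdx, if_neg (by tauto), ih h.2]
    simp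

theorem myIdx_mem (s : List Char) (c : Char) (h : c ∈ s) :
    0 ≤ myIdx s c ∧ myIdx s c < s.length ∧ s[(myIdx s c).toNat]? = some c ∧
      ∀ j < (myIdx s c).toNat, s[j]? ≠ some c := by
  induction s with
  | nil => simp at h
  | cons x t ih =>
    by_cases hx : x = c
    · subst hx
      rw [myIdx, if_pos rfl]
      refine ⟨le_refl 0, by simp, by simp, by omega⟩
    · have hc : c ∈ t := by
        rcases List.mem_cons.mp h with h' | h'
        · exact absurd h'.symm hx
        · exact h'
      obtain ⟨h1, h2, h3, h4⟩ := ih hc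
      have hne : myIdx t c ≠ -1 := by omega
      rw [myIdx, if_neg hx, if_neg hne]
      refine ⟨by omega, by simp; omega, ?_, ?_⟩
      · have hnn : ((myIdx t c + 1)).toNat = (myIdx t c).toNat + 1 := by omega
        rw [hnn]; simpa using h3
      · intro j hj
        have hnn : ((myIdx t c + 1)).toNat = (myIdx t c).toNat + 1 := by omega
        rw [hnn] at hj
        match j with
        | 0 => simp [hx]
        | j + 1 => simpa using h4 j (by omega)

theorem myIdx_append_single (xs : List Char) (d c : Char) :
    myIdx (xs ++ [d]) c =
      if myIdx xs c = -1 then (if d = c then (xs.length : Int) else -1)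
      else myIdx xs c := by
  induction xs with
  | nil => simp [myIdx]
  | cons x t ih =>
    by_cases hx : x = c
    · simp [myIdx, hx]
    · rw [List.cons_append]
      simp only [myIdx, if_neg hx]
      rw [ih]
      have hge := myIdx_ge t c
      by_cases h1 : myIdx t c = -1
      · by_cases hd : d = c
        · simp [h1, hd]
        · simp [h1, hd]
      · have h2 : myIdx t c + 1 ≠ -1 := by omega
        simp [h1, h2]

theorem singleton_prefix_iff (c : Char) (t : List Char) :
    [c] <+: t ↔ t.head? = some c := by
  cases t with
  | nil => simp
  | cons x u =>
    constructor
    · intro h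
      obtain ⟨r, hr⟩ := h
      simp at hr
      simp [hr.1]
    · intro h
      simp at h
      exact ⟨u, by simp [h]⟩

theorem find_single (s : List Char) (c : Char) :
    PySem.Chars.find s [c] = myIdx s c := by
  by_cases h : c ∈ s
  · have hnn : 0 ≤ PySem.Chars.find s [c] := by
      rw [PySem.Chars.find_nonneg_iff]
      exact (List.singleton_infix_iff c s).mpr h
    obtain ⟨hp, hmin⟩ := PySem.Chars.find_spec hnn
    obtain ⟨m1, m2, m3, m4⟩ := myIdx_mem s c h
    have hF : s[(PySem.Chars.find s [c]).toNat]? = some c := by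
      rw [← List.head?_drop]
      rw [singleton_prefix_iff] at hp
      exact hp
    have heq : (PySem.Chars.find s [c]).toNat = (myIdx s c).toNat := by
      rcases Nat.lt_trichotomy (PySem.Chars.find s [c]).toNat (myIdx s c).toNat with hlt | he | hgt
      · exact absurd hF (m4 _ hlt)
      · exact he
      · exfalso
        apply hmin _ hgt
        rw [singleton_prefix_iff, List.head?_drop]
        exact m3
    omega
  · rw [myIdx_not_mem s c h, PySem.Chars.find_eq_neg_one_iff]
    rw [List.singleton_infix_iff]
    exact h

-- floor div/mod on positive num agree with Nat operations
theorem floordiv_pos (num : Int) (h : 0 < num) :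
    PySem.Int.floordiv num 10 = ((num.toNat / 10 : Nat) : Int) := by
  rw [PySem.Int.floordiv]
  simp [Int.fdiv_eq_ediv]
  omega

theorem mod_pos (num : Int) (h : 0 < num) :
    PySem.Int.mod num 10 = ((num.toNat % 10 : Nat) : Int) := by
  rw [PySem.Int.mod]
  simp [Int.fmod_eq_emod]
  omega

-- the loop ignores k outside 0..9
theorem solGo_out_of_range (k num a i : Int) (hk : k < 0 ∨ 9 < k) :
    (solGo k num a i).1 = a := by
  by_cases h : 0 < num
  · rw [solGo, dif_pos h]
    have hm : PySem.Int.mod num 10 ≠ k := by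
      rw [mod_pos num h]
      have := Nat.mod_lt num.toNat (show 0 < 10 by norm_num)
      omega
    rw [if_neg hm]
    exact solGo_out_of_range k _ a (i + 1) hk
  · rw [solGo, dif_neg h]
termination_by num.toNat
decreasing_by
  rw [floordiv_pos num h]
  have := Nat.div_lt_self (by omega : 0 < num.toNat) (by norm_num : 1 < (10:Nat))
  omega

theorem solGo_nonpos (k num a i : Int) (h : ¬ 0 < num) : solGo k num a i = (a, i) := by
  rw [solGo, dif_neg h]

-- the loop counter ends at i + number of digits
theorem solGo_snd (k : Int) :
    ∀ n : Nat, 0 < n → ∀ a i : Int,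
      (solGo k (n : Int) a i).2 = i + (chars n).length := by
  intro n
  induction n using Nat.strong_induction_on with
  | _ n ih =>
    intro hn a i
    rw [solGo, dif_pos (by omega : (0:Int) < (n:Int))]
    have hcast : ((n : Int)).toNat = n := by omega
    rw [floordiv_pos _ (by omega), mod_pos _ (by omega), hcast]
    rw [chars_pos n hn]
    by_cases h0 : n / 10 = 0
    · rw [h0, chars_zero]
      rw [solGo_nonpos _ _ _ _ (by simp)]
      simp
    · rw [ih (n / 10) (by omega) (Nat.pos_of_ne_zero h0) _ (i + 1)]
      simp only [List.length_append, List.length_cons, List.length_nil]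
      push_cast
      ring

-- the loop's recorded answer, in terms of the first matching position from the left
theorem solGo_fst (k : Int) (hk0 : 0 ≤ k) (hk9 : k ≤ 9) :
    ∀ n : Nat, 0 < n → ∀ a i : Int,
      (solGo k (n : Int) a i).1 =
        if myIdx (chars n) (Nat.digitChar k.toNat) = -1 then a
        else i + ((chars n).length - 1 - myIdx (chars n) (Nat.digitChar k.toNat)) := by
  intro n
  induction n using Nat.strong_induction_on with
  | _ n ih =>
    intro hn a i
    rw [solGo, dif_pos (by omega : (0:Int) < (n:Int))]
    have hcast : ((n : Int)).toNat = n := by omega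
    rw [floordiv_pos _ (by omega), mod_pos _ (by omega), hcast]
    have hmatch : (((n % 10 : Nat) : Int) = k) ↔ Nat.digitChar (n % 10) = Nat.digitChar k.toNat := by
      constructor
      · intro h; rw [show n % 10 = k.toNat by omega]
      · intro h
        have := digitChar_inj (n % 10) k.toNat (Nat.mod_lt _ (by norm_num)) (by omega) h
        omega
    rw [chars_pos n hn, myIdx_append_single]
    by_cases h0 : n / 10 = 0
    · rw [h0, chars_zero]
      rw [solGo_nonpos _ _ _ _ (by simp)]
      by_cases hd : Nat.digitChar (n % 10) = Nat.digitChar k.toNat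
      · have hik := hmatch.mpr hd
        simp [myIdx, hd, hik]
      · have hik : ¬ ((n % 10 : Nat) : Int) = k := fun hh => hd (hmatch.mp hh)
        simp [myIdx, hd]
        omega
    · rw [ih (n / 10) (by omega) (Nat.pos_of_ne_zero h0) _ (i + 1)]
      have hlen := chars_len_pos (n / 10) (Nat.pos_of_ne_zero h0)
      by_cases h1 : myIdx (chars (n / 10)) (Nat.digitChar k.toNat) = -1
      · by_cases hd : Nat.digitChar (n % 10) = Nat.digitChar k.toNat
        · rw [if_pos h1, if_pos h1, if_pos hd]
          rw [if_neg (by omega : ¬ (((chars (n / 10)).length : Int)) = -1)]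
          rw [if_pos (hmatch.mpr hd)]
          simp only [List.length_append, List.length_cons, List.length_nil]
          push_cast
          ring
        · rw [if_pos h1, if_pos h1, if_neg hd, if_pos rfl]
          rw [if_neg (fun hh => hd (hmatch.mp hh))]
      · have hge := myIdx_ge (chars (n / 10)) (Nat.digitChar k.toNat)
        rw [if_neg h1, if_neg h1, if_neg h1]
        simp only [List.length_append, List.length_cons, List.length_nil]
        push_cast
        ring

-- ===== VERDICT (by name: the statement is the Claim_ definition above) =====
theorem solution_spec : Claim_equal_solution := by
  intro num k _
  unfold Spec_solution solution solution_alt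
  by_cases hnum : 0 < num
  · by_cases hk : 0 ≤ k ∧ k ≤ 9
    · rw [if_neg (show ¬ (num ≤ 0 ∨ k < 0 ∨ 9 < k) by omega)]
      have hcast : ((num.toNat : Nat) : Int) = num := by omega
      have hfst := solGo_fst k hk.1 hk.2 num.toNat (by omega) (-1) 0
      have hsnd := solGo_snd k num.toNat (by omega) (-1) 0
      rw [hcast] at hfst hsnd
      have hfind : PySem.Str.find (PySem.Int.toStr num) (PySem.Int.toStr k)
          = myIdx (chars num.toNat) (Nat.digitChar k.toNat) := by
        rw [PySem.Str.find_eq, PySem.Int.toList_toStr, PySem.Int.toList_toStr,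
          toChars_pos num hnum, toChars_digit k hk.1 hk.2, find_single]
      rw [hfind]
      by_cases h1 : myIdx (chars num.toNat) (Nat.digitChar k.toNat) = -1
      · rw [if_pos h1] at hfst
        simp [hfst, h1]
      · obtain ⟨m1, m2, _, _⟩ := myIdx_mem (chars num.toNat) (Nat.digitChar k.toNat)
          (by
            by_contra hmem
            exact h1 (myIdx_not_mem _ _ hmem))
        have hlen := chars_len_pos num.toNat (by omega)
        rw [if_neg h1] at hfst
        rw [if_neg h1]
        rw [hfst, hsnd]
        rw [if_neg (by omega)]
        omega
    · rw [if_pos (show num ≤ 0 ∨ k < 0 ∨ 9 < k by omega)]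
      have h1 := solGo_out_of_range k num (-1) 0 (by omega)
      simp [h1]
  · rw [if_pos (show num ≤ 0 ∨ k < 0 ∨ 9 < k from Or.inl (by omega))]
    rw [solGo_nonpos k num (-1) 0 hnum]
    simp
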